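-- pv_equiv track=rewrite | github.com/Yskinator/csv_analysis_scripts | utilities/brands_to_top_categories.py | process_brands
-- ===== SOURCE A (Python) =====
-- def process_brands(preprocessed, brand_counts):
--     """Process brands from list of dicts 'preprocessed', ignoring brands with brandcount < 20."""
--     brands = {}
--     for row in preprocessed:
--         brand_str = row['Brands']
--         descr = row['Description']
--         for brand in set(brand_str.split(";")):
--             if not brand:
--                 continue
--             if brand in brand_counts and int(brand_counts[brand]) < 20:
--                 # Ignore small brands, the results would not be reliable
--                 continue
--             if brand in brands:
--                 brands[brand].append(descr)
--             else:
--                 brands[brand] = [descr]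
--     return brands
-- ===== SOURCE B (Python) =====
-- def process_brands(preprocessed, brand_counts):
--     """Process brands from list of dicts 'preprocessed', ignoring brands with brandcount < 20."""
--     def keep(brand):
--         return brand != "" and not (brand in brand_counts and int(brand_counts[brand]) < 20)
--     pairs = [(brand, row['Description'])
--              for row in preprocessed
--              for brand in dict.fromkeys(row['Brands'].split(';'))
--              if keep(brand)]
--     keys = list(dict.fromkeys(brand for brand, _ in pairs))
--     return {b: [d for x, d in pairs if x == b] for b in keys}
-- ===== Notes on version B (the rewrite author's own statement) =====
-- stated objective: alternative
-- what changed: Replaces A's stateful dict accumulation inside nested loops by a stateless pipeline: flatten rows into a (brand, description) pair list with per-row dedup and filtering, dedup the brand keys once, and build each brand's group with a comprehension over the pair list.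
-- outside the precondition, e.g. on process_brands([{'Description': 'd'}], {}): A raises KeyError, B raises KeyError; on process_brands([{'Brands': 'a', 'Description': 'd'}], {'a': 'x'}): A raises ValueError, B raises ValueError
import Mathlib
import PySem

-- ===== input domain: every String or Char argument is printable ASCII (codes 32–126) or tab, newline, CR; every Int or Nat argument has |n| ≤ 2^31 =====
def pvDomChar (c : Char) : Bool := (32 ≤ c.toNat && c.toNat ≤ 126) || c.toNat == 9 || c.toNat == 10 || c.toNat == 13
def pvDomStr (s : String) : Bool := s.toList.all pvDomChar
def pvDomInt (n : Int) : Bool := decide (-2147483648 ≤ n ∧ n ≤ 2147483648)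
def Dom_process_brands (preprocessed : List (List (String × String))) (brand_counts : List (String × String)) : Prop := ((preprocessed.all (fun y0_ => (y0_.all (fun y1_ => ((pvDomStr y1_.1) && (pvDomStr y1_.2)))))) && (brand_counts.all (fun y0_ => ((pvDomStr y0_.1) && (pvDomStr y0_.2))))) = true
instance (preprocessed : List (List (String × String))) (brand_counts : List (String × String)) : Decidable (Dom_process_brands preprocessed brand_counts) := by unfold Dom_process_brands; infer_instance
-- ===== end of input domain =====

-- B replaces A's stateful dict accumulation by a stateless pipeline: flatten rows to (brand, descr)
-- pairs, dedup the brand keys once, and build each group by a comprehension (objective: alternative).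
-- Equivalence is about the RETURN value; keys appear in first-kept-occurrence order in both ports
-- (Python's set/dict iteration order only permutes the result dict's key order, which dict equality ignores).

-- ===== PORT A =====
def process_brands (preprocessed : List (List (String × String))) (brand_counts : List (String × String)) : List (String × List String) :=
  let bcd := PySem.Dict.ofList brand_counts
  (preprocessed.foldl (fun brands row =>
      let rowd := PySem.Dict.ofList row
      let brand_str := rowd.getD "Brands" ""        -- row['Brands']; KeyError excluded by Pre_
      let descr := rowd.getD "Description" ""       -- row['Description']; KeyError excluded by Pre_
      (PySem.Set.ofList ((PySem.Str.split? brand_str ";").getD [])).foldl (fun brands brand =>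
        if brand = "" then brands
        -- int(brand_counts[brand]): ValueError (unparsable value) excluded by Pre_, getD 0 is arbitrary there
        else if bcd.contains brand && decide ((PySem.Int.ofStr? (bcd.getD brand "")).getD 0 < 20) then brands
        else if brands.contains brand then brands.modify brand [] (· ++ [descr])
        else brands.insert brand [descr]) brands)
    PySem.Dict.empty).items

-- ===== PORT B =====
-- Python B's local 'keep' predicate (same total rendering of int(...) as in port A; Pre_ covers ValueError)
def pvKeep (bcd : PySem.Dict String String) (brand : String) : Bool :=
  brand != "" && !(bcd.contains brand && decide ((PySem.Int.ofStr? (bcd.getD brand "")).getD 0 < 20))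

def process_brands_alt (preprocessed : List (List (String × String))) (brand_counts : List (String × String)) : List (String × List String) :=
  let bcd := PySem.Dict.ofList brand_counts
  let pairs := preprocessed.flatMap (fun row =>
      let rowd := PySem.Dict.ofList row
      ((PySem.List.dedup ((PySem.Str.split? (rowd.getD "Brands" "") ";").getD [])).filter (pvKeep bcd)).map
        (fun brand => (brand, rowd.getD "Description" "")))
  let keys := PySem.List.dedup (pairs.map (·.1))
  keys.map (fun b => (b, (pairs.filter (fun p => p.1 == b)).map (·.2)))

-- ===== PRECONDITION & SPEC =====
-- Pre_ excludes exactly the inputs where the Python A raises: a row missing the 'Brands' or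
-- 'Description' key (KeyError), or a looked-up brand whose brand_counts value int() cannot parse (ValueError).
def Pre_process_brands (preprocessed : List (List (String × String))) (brand_counts : List (String × String)) : Prop :=
  ∀ row ∈ preprocessed,
    (PySem.Dict.ofList row).contains "Brands" = true ∧
    (PySem.Dict.ofList row).contains "Description" = true ∧
    ∀ b ∈ (PySem.Str.split? ((PySem.Dict.ofList row).getD "Brands" "") ";").getD [],
      b ≠ "" → ((((PySem.Dict.ofList brand_counts).get? b).map (fun v => (PySem.Int.ofStr? v).isSome)).getD true) = true
instance (preprocessed : List (List (String × String))) (brand_counts : List (String × String)) : Decidable (Pre_process_brands preprocessed brand_counts) := by unfold Pre_process_brands; infer_instance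

def pvWitness_process_brands : (List (List (String × String))) × (List (String × String)) :=
  ([[("Brands", "a;b"), ("Description", "d1")], [("Brands", "b"), ("Description", "d2")]], [("a", "5"), ("b", "25")])

def Spec_process_brands (preprocessed : List (List (String × String))) (brand_counts : List (String × String)) (out : List (String × List String)) : Prop := out = process_brands_alt preprocessed brand_counts
instance (preprocessed : List (List (String × String))) (brand_counts : List (String × String)) (out : List (String × List String)) : Decidable (Spec_process_brands preprocessed brand_counts out) := by unfold Spec_process_brands; infer_instance

-- ===== CLAIM (what is proved, stated in full; the proofs are below) =====
def Claim_equal_process_brands : Prop := ∀ (preprocessed : List (List (String × String))) (brand_counts : List (String × String)), Dom_process_brands preprocessed brand_counts → Pre_process_brands preprocessed brand_counts → Spec_process_brands preprocessed brand_counts (process_brands preprocessed brand_counts)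

-- ===== LEMMAS AND PROOFS =====

-- folding over a flattened list is the nested fold
lemma pv_foldl_flatMap {α β γ : Type} (g : α → List β) (f : γ → β → γ) (l : List α) (init : γ) :
    (l.flatMap g).foldl f init = l.foldl (fun a x => (g x).foldl f a) init := by
  induction l generalizing init with
  | nil => rfl
  | cons y ys ih => simp [List.foldl_append, ih]

-- inserting a fresh key is a modify from the default
lemma pv_modify_fresh (d : PySem.Dict String (List String)) (k v : String)
    (h : d.contains k = false) : d.modify k [] (· ++ [v]) = d.insert k [v] := by
  simp [PySem.Dict.modify, PySem.Dict.getD_of_not_contains d [] h]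

-- A's inner loop body is "modify when kept, else skip"
lemma pv_step_eq (bcd : PySem.Dict String String) (descr : String)
    (d : PySem.Dict String (List String)) (b : String) :
    (if b = "" then d
      else if bcd.contains b && decide ((PySem.Int.ofStr? (bcd.getD b "")).getD 0 < 20) then d
      else if d.contains b then d.modify b [] (· ++ [descr]) else d.insert b [descr])
    = (if pvKeep bcd b then d.modify b [] (· ++ [descr]) else d) := by
  by_cases hb : b = "" <;>
    by_cases hc : (bcd.contains b && decide ((PySem.Int.ofStr? (bcd.getD b "")).getD 0 < 20)) = true <;>
      simp [pvKeep, hb, hc]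
  by_cases hm : d.contains b = true
  · simp [hm]
  · simp [hm, pv_modify_fresh d b descr (by simpa using hm)]

-- the grouping fold characterised: items = dedup'd keys, each with its filtered descriptions
lemma pv_items_group (pairs : List (String × String)) :
    (pairs.foldl (fun d p => d.modify p.1 [] (· ++ [p.2])) PySem.Dict.empty).items
    = (PySem.List.dedup (pairs.map (·.1))).map
        (fun b => (b, (pairs.filter (fun p => p.1 == b)).map (·.2))) := by
  have hn : (pairs.foldl (fun d p => d.modify p.1 [] (· ++ [p.2])) PySem.Dict.empty).keys.Nodup := by
    exact PySem.Dict.nodup_keys_foldl_modify_key pairs Prod.fst [] (fun _ p => (· ++ [p.2]))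
      PySem.Dict.empty PySem.Dict.nodup_keys_empty
  rw [PySem.Dict.items_eq_map_keys _ hn []]
  have hk : (pairs.foldl (fun d p => d.modify p.1 [] (· ++ [p.2])) PySem.Dict.empty).keys
      = PySem.List.dedup (pairs.map (·.1)) := by
    rw [PySem.Dict.keys_foldl_modify_key pairs Prod.fst [] (fun _ p => (· ++ [p.2])) PySem.Dict.empty]
    simp [PySem.Dict.keys_empty, PySem.Set.update_nil_left, PySem.List.dedup]
  rw [hk]
  refine List.map_congr_left (fun b _ => ?_)
  rw [PySem.Dict.getD_foldl_modify_append]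
  simp [PySem.Dict.getD_empty]

-- ===== VERDICT (by name: the statement is the Claim_ definition above) =====
theorem process_brands_spec : Claim_equal_process_brands := by
  intro pp bc _ _
  unfold Spec_process_brands process_brands process_brands_alt
  dsimp only
  rw [← pv_items_group, pv_foldl_flatMap]
  congr 1
  congr 1
  funext d row
  dsimp only
  rw [List.foldl_map, List.foldl_filter]
  simp only [PySem.List.dedup]
  congr 1
  funext d' b
  exact pv_step_eq _ _ d' b
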